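-- pv_equiv track=rewrite | github.com/bVendeville/Evaluating-Text-Simplicity-Is-Not-That-Simple | src/statistics/significance_matrix.py | find_globally_top_metrics
-- ===== SOURCE A (Python) =====
-- from typing import Dict, List, Optional, Tuple, Union
--
-- def find_globally_top_metrics(
--     results: Dict[str, Dict]
-- ) -> List[str]:
--     """
--     Find metrics that are in the top group for ALL datasets.
--
--     Args:
--         results: Dict mapping dataset name to analysis results
--
--     Returns:
--         List of globally top-performing metrics
--     """
--     if not results:
--         return []
--
--     # Get top metrics for each dataset
--     top_sets = [
--         set(r['top_metrics']) for r in results.values()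
--     ]
--
--     # Intersection of all top metric sets
--     global_top = top_sets[0]
--     for top_set in top_sets[1:]:
--         global_top = global_top.intersection(top_set)
--
--     return sorted(list(global_top))
-- ===== SOURCE B (Python) =====
-- def find_globally_top_metrics(results):
--     """Tally, per metric, how many datasets list it among their top metrics
--     (deduped per dataset); the globally top metrics are exactly those whose
--     tally equals the number of datasets."""
--     if not results:
--         return []
--     counts = {}
--     for r in results.values():
--         for m in set(r['top_metrics']):
--             counts[m] = counts.get(m, 0) + 1
--     n = len(results)
--     return sorted(m for m, c in counts.items() if c == n)
-- ===== Notes on version B (the rewrite author's own statement) =====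
-- stated objective: alternative
-- what changed: Replaces the fold of repeated set intersections with a single occurrence tally (a dict counter fed by each dataset's deduped top_metrics) followed by a threshold filter count == len(results).
import Mathlib
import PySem

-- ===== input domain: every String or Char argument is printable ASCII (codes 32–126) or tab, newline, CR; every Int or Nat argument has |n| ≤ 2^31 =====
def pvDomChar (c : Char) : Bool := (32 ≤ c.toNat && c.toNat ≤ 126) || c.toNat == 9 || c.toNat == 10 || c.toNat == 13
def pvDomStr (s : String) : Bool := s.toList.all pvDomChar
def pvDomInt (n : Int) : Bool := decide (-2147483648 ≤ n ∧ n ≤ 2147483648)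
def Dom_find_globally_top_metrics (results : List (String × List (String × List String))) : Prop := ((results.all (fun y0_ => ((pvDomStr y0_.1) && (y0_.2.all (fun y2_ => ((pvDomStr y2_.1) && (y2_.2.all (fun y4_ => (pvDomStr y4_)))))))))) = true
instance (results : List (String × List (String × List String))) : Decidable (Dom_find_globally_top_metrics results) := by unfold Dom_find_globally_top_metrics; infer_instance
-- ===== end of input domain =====

-- B replaces the fold of repeated set intersections with one occurrence tally
-- (dict counter over each dataset's deduped top metrics) and a threshold filter.

-- shared helper: r['top_metrics'] (Pre_ guarantees the key is present; [] is the unreachable none branch)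
def pvTop (r : List (String × List String)) : List String :=
  ((PySem.Dict.mk r).get? "top_metrics").getD []

-- ===== PORT A =====
def find_globally_top_metrics (results : List (String × List (String × List String))) : List String :=
  if results.isEmpty then []
  else
    let top_sets : List (PySem.Set String) :=
      results.map (fun p => PySem.Set.ofList (pvTop p.2))
    match top_sets with
    | [] => []
    | s0 :: restSets =>
      PySem.List.sorted (restSets.foldl (fun g t => PySem.Set.inter g t) s0) (fun x => x) false

-- ===== PORT B =====
def find_globally_top_metrics_alt (results : List (String × List (String × List String))) : List String :=
  if results.isEmpty then []
  else
    let counts : PySem.Dict String Int :=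
      results.foldl
        (fun c p => (PySem.Set.ofList (pvTop p.2)).foldl
          (fun c m => c.insert m (c.getD m 0 + 1)) c)
        PySem.Dict.empty
    let n : Int := results.length
    PySem.List.sorted ((counts.items.filter (fun q => q.2 == n)).map (fun q => q.1)) (fun x => x) false

-- ===== PRECONDITION & SPEC =====
-- Pre_ excludes exactly the inputs where some dataset's dict lacks the key 'top_metrics' (Python A raises KeyError there).
def Pre_find_globally_top_metrics (results : List (String × List (String × List String))) : Prop :=
  (results.all (fun p => (PySem.Dict.mk p.2).contains "top_metrics")) = true
instance (results : List (String × List (String × List String))) : Decidable (Pre_find_globally_top_metrics results) := by unfold Pre_find_globally_top_metrics; infer_instance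

def pvWitness_find_globally_top_metrics : (List (String × List (String × List String))) :=
  [("d1", [("top_metrics", ["b", "a"])]), ("d2", [("top_metrics", ["a", "c"])])]

def Spec_find_globally_top_metrics (results : List (String × List (String × List String))) (out : List String) : Prop := out = find_globally_top_metrics_alt results
instance (results : List (String × List (String × List String))) (out : List String) : Decidable (Spec_find_globally_top_metrics results out) := by unfold Spec_find_globally_top_metrics; infer_instance

-- ===== CLAIM (what is proved, stated in full; the proofs are below) =====
def Claim_equal_find_globally_top_metrics : Prop := ∀ (results : List (String × List (String × List String))), Dom_find_globally_top_metrics results → Pre_find_globally_top_metrics results → Spec_find_globally_top_metrics results (find_globally_top_metrics results)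

-- ===== LEMMAS AND PROOFS =====

-- membership in the intersection fold of A
theorem pv_mem_foldl_inter (l : List (PySem.Set String)) (s : PySem.Set String) (m : String) :
    m ∈ l.foldl (fun g t => PySem.Set.inter g t) s ↔ m ∈ s ∧ ∀ t ∈ l, m ∈ t := by
  induction l generalizing s with
  | nil => simp
  | cons t l ih =>
    simp [List.foldl_cons, ih, PySem.Set.mem_inter]
    tauto

theorem pv_nodup_foldl_inter (l : List (PySem.Set String)) (s : PySem.Set String) (hs : s.Nodup) :
    (l.foldl (fun g t => PySem.Set.inter g t) s).Nodup := by
  induction l generalizing s with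
  | nil => exact hs
  | cons t l ih => exact ih _ (PySem.Set.nodup_inter s t hs)

-- B's nested counting loop is the counting loop over the flattened list
theorem pv_counts_eq_flat (results : List (String × List (String × List String)))
    (d : PySem.Dict String Int) :
    results.foldl
      (fun c p => (PySem.Set.ofList (pvTop p.2)).foldl
        (fun c m => c.insert m (c.getD m 0 + 1)) c) d
    = (results.flatMap (fun p => PySem.Set.ofList (pvTop p.2))).foldl
        (fun c m => c.insert m (c.getD m 0 + 1)) d := by
  induction results generalizing d with
  | nil => rfl
  | cons p rest ih => simp [List.foldl_cons, List.flatMap_cons, List.foldl_append, ih]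

theorem pv_count_flat (results : List (String × List (String × List String))) (m : String) :
    (results.flatMap (fun p => PySem.Set.ofList (pvTop p.2))).count m
    = results.countP (fun p => decide (m ∈ PySem.Set.ofList (pvTop p.2))) := by
  induction results with
  | nil => rfl
  | cons p rest ih =>
    rw [List.flatMap_cons, List.count_append, ih, List.countP_cons]
    by_cases hm : m ∈ PySem.Set.ofList (pvTop p.2)
    · rw [List.count_eq_one_of_mem (PySem.Set.nodup_ofList _) hm]
      simp [hm]; omega
    · rw [List.count_eq_zero_of_not_mem hm]
      simp [hm]


-- B's tally at m is the number of datasets whose top set contains m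
theorem pv_getD_counts (results : List (String × List (String × List String))) (m : String) :
    ((results.flatMap (fun p => PySem.Set.ofList (pvTop p.2))).foldl
        (fun c m => c.insert m (c.getD m 0 + 1)) PySem.Dict.empty).getD m 0
    = (results.countP (fun p => decide (m ∈ PySem.Set.ofList (pvTop p.2))) : Int) := by
  rw [PySem.Dict.getD_foldl_insert_add_one, pv_count_flat]
  simp [PySem.Dict.getD_empty]

-- the heart of the claim: on a nonempty dict, A's intersection fold and B's tally-and-filter sort the same set
theorem pv_main (p : String × List (String × List String)) (rest : List (String × List (String × List String))) :
    PySem.List.sorted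
      ((rest.map (fun q => PySem.Set.ofList (pvTop q.2))).foldl (fun g t => PySem.Set.inter g t)
        (PySem.Set.ofList (pvTop p.2))) (fun x => x) false
    = PySem.List.sorted
        (((((p :: rest).flatMap (fun q => PySem.Set.ofList (pvTop q.2))).foldl
            (fun c m => c.insert m (c.getD m 0 + 1)) PySem.Dict.empty).items.filter
              (fun q => q.2 == ((p :: rest).length : Int))).map (fun q => q.1)) (fun x => x) false := by
  set d : PySem.Dict String Int := (((p :: rest).flatMap (fun q => PySem.Set.ofList (pvTop q.2))).foldl
      (fun c m => c.insert m (c.getD m 0 + 1)) PySem.Dict.empty) with hd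
  have hnd : d.keys.Nodup := by
    rw [hd]; exact PySem.Dict.nodup_keys_foldl_insert _ _ _ PySem.Dict.nodup_keys_empty
  have hkeys : d.keys = PySem.Set.ofList ((p :: rest).flatMap (fun q => PySem.Set.ofList (pvTop q.2))) := by
    rw [hd, PySem.Dict.keys_foldl_insert]
    exact PySem.Set.update_nil_left _
  have hB : (d.items.filter (fun q => q.2 == ((p :: rest).length : Int))).map (fun q => q.1)
      = d.keys.filter (fun k => d.getD k 0 == ((p :: rest).length : Int)) := by
    rw [PySem.Dict.items_eq_map_keys d hnd 0, List.filter_map, List.map_map]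
    simp [Function.comp_def]
  rw [hB]
  apply PySem.List.sorted_eq_sorted_of_perm _ _ _ (fun _ _ h => h)
  apply (List.perm_ext_iff_of_nodup ?_ ?_).mpr ?_
  · exact pv_nodup_foldl_inter _ _ (PySem.Set.nodup_ofList _)
  · exact hnd.filter _
  · intro x
    have hKeyMem : x ∈ d.keys ↔ ∃ q ∈ p :: rest, x ∈ PySem.Set.ofList (pvTop q.2) := by
      rw [hkeys, PySem.Set.mem_ofList, List.mem_flatMap]
    rw [pv_mem_foldl_inter, List.mem_filter, hKeyMem]
    have hgetD : d.getD x 0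
        = ((p :: rest).countP (fun q => decide (x ∈ PySem.Set.ofList (pvTop q.2))) : Int) := by
      rw [hd]; exact pv_getD_counts _ x
    constructor
    · rintro ⟨h0, hall⟩
      have hforall : ∀ q ∈ p :: rest, x ∈ PySem.Set.ofList (pvTop q.2) := by
        intro q hq
        rcases List.mem_cons.mp hq with rfl | hq'
        · exact h0
        · exact hall _ (List.mem_map_of_mem hq')
      refine ⟨⟨p, List.mem_cons_self .., h0⟩, ?_⟩
      have hcnt : (p :: rest).countP (fun q => decide (x ∈ PySem.Set.ofList (pvTop q.2)))
          = (p :: rest).length := List.countP_eq_length.mpr (by simpa using hforall)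
      exact beq_iff_eq.mpr (by rw [hgetD, hcnt])
    · rintro ⟨-, hpred⟩
      have heq : d.getD x 0 = ((p :: rest).length : Int) := by simpa using hpred
      rw [hgetD] at heq
      have hcnt : (p :: rest).countP (fun q => decide (x ∈ PySem.Set.ofList (pvTop q.2)))
          = (p :: rest).length := by exact_mod_cast heq
      have hforall := List.countP_eq_length.mp hcnt
      exact ⟨by simpa using hforall p (List.mem_cons_self ..),
             fun t ht => by
               rcases List.mem_map.mp ht with ⟨q, hq, rfl⟩
               simpa using hforall q (List.mem_cons_of_mem _ hq)⟩

-- ===== VERDICT (by name: the statement is the Claim_ definition above) =====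
theorem find_globally_top_metrics_spec : Claim_equal_find_globally_top_metrics := by
  intro results _ _
  unfold Spec_find_globally_top_metrics
  unfold find_globally_top_metrics find_globally_top_metrics_alt
  cases results with
  | nil => rfl
  | cons p rest =>
    simp only [List.isEmpty_cons, Bool.false_eq_true, if_false, List.map_cons]
    rw [pv_counts_eq_flat]
    exact pv_main p rest
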